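-- pv_equiv track=rewrite | github.com/JanoschMenke/metis | metis/utils/helper.py | prep_smiles_libevent
-- ===== SOURCE A (Python) =====
-- def prep_smiles_libevent(smiles):
--     """
--     The function `prep_smiles_libevent` replaces each occurrence of "*" in a given string with "[*:x]",
--     where x is a counter that increments for each occurrence of "*". This enables the Smiles to be used
--     for libinvent
--     """
--     new_smiles = ""
--     counter = 0
--     for charakter in smiles:
--         if charakter == "*":
--             new_smiles += f"[*:{counter}]"
--             counter += 1
--         else:
--             new_smiles += charakter
--     return new_smiles
-- ===== SOURCE B (Python) =====
-- def prep_smiles_libevent(smiles):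
--     parts = smiles.split('*')
--     return parts[0] + ''.join(f'[*:{i}]' + p for i, p in enumerate(parts[1:]))
-- ===== Notes on version B (the rewrite author's own statement) =====
-- stated objective: idiomatic
-- what changed: B splits the string on the star character once and joins the segments with numbered [*:i] tokens (counter = join index), instead of A's character-by-character loop with a mutated counter and repeated string concatenation.
import Mathlib
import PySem

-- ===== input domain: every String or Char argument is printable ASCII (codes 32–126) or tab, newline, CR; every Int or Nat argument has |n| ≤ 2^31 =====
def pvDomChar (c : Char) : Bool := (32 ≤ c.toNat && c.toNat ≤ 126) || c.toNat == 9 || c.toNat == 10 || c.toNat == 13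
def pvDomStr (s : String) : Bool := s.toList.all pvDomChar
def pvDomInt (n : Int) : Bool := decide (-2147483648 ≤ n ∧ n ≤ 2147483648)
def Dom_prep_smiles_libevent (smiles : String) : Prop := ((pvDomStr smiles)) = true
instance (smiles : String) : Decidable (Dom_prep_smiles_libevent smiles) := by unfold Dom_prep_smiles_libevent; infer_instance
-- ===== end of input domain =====

-- B replaces A's character loop (mutable counter, repeated concatenation) by an idiomatic
-- split-on-'*' followed by a join with numbered tokens, the counter being the join index.


-- shared rendering of the f-string literal f'[*:{i}]'
def pvToken (i : Int) : List Char := '[' :: '*' :: ':' :: (PySem.Int.toChars i ++ [']'])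

-- ===== PORT A =====
def prep_smiles_libevent (smiles : String) : String :=
  let st := smiles.toList.foldl
    (fun (st : List Char × Int) ch =>
      if ch = '*' then (st.1 ++ pvToken st.2, st.2 + 1)
      else (st.1 ++ [ch], st.2))
    ([], 0)
  String.ofList st.1

-- ===== PORT B =====
def prep_smiles_libevent_alt (smiles : String) : String :=
  let parts := PySem.Chars.splitOn smiles.toList ['*']
  String.ofList
    (parts.headD [] ++
      (PySem.List.enumerate parts.tail 0).flatMap (fun ip => pvToken ip.1 ++ ip.2))

-- ===== PRECONDITION & SPEC =====
def Spec_prep_smiles_libevent (smiles : String) (out : String) : Prop := out = prep_smiles_libevent_alt smiles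
instance (smiles : String) (out : String) : Decidable (Spec_prep_smiles_libevent smiles out) := by unfold Spec_prep_smiles_libevent; infer_instance

-- ===== CLAIM (what is proved, stated in full; the proofs are below) =====
def Claim_equal_prep_smiles_libevent : Prop := ∀ (smiles : String), Dom_prep_smiles_libevent smiles → Spec_prep_smiles_libevent smiles (prep_smiles_libevent smiles)

-- ===== LEMMAS AND PROOFS =====

-- fuel-free specification of splitting on a single '*'
def pvSp : List Char → List (List Char)
  | [] => [[]]
  | c :: cs =>
    if c = '*' then [] :: pvSp cs
    else
      match pvSp cs with
      | [] => [[c]]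
      | h :: t => (c :: h) :: t

theorem pvSp_ne_nil (cs : List Char) : pvSp cs ≠ [] := by
  cases cs with
  | nil => simp [pvSp]
  | cons c cs =>
    simp only [pvSp]
    split
    · simp
    · cases h : pvSp cs <;> simp

theorem pvGo_eq (fuel : Nat) (l cur : List Char) (acc : List (List Char))
    (hf : l.length < fuel) :
    PySem.Chars.splitOn.go ['*'] fuel l cur acc =
      acc.reverse ++ (cur.reverse ++ (pvSp l).headD []) :: (pvSp l).tail := by
  induction fuel generalizing l cur acc with
  | zero => omega
  | succ fuel ih =>
    cases l with
    | nil => simp [PySem.Chars.splitOn.go, pvSp]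
    | cons c rest =>
      have hrest : rest.length < fuel := by simpa using hf
      by_cases hc : c = '*'
      · subst hc
        rw [show PySem.Chars.splitOn.go ['*'] (fuel+1) ('*' :: rest) cur acc =
              PySem.Chars.splitOn.go ['*'] fuel rest [] (cur.reverse :: acc) by
            simp [PySem.Chars.splitOn.go, List.isPrefixOf]]
        rw [ih rest [] _ hrest]
        obtain ⟨h, t, hht⟩ : ∃ h t, pvSp rest = h :: t := by
          cases hsp : pvSp rest with
          | nil => exact absurd hsp (pvSp_ne_nil rest)
          | cons h t => exact ⟨h, t, rfl⟩
        simp [pvSp, hht]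
      · rw [show PySem.Chars.splitOn.go ['*'] (fuel+1) (c :: rest) cur acc =
              PySem.Chars.splitOn.go ['*'] fuel rest (c :: cur) acc by
            simp [PySem.Chars.splitOn.go, List.isPrefixOf, Ne.symm hc]]
        rw [ih rest (c :: cur) acc hrest]
        obtain ⟨h, t, hht⟩ : ∃ h t, pvSp rest = h :: t := by
          cases hsp : pvSp rest with
          | nil => exact absurd hsp (pvSp_ne_nil rest)
          | cons h t => exact ⟨h, t, rfl⟩
        simp [pvSp, hc, hht]

theorem pvSplitOn_eq (cs : List Char) : PySem.Chars.splitOn cs ['*'] = pvSp cs := by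
  rw [PySem.Chars.splitOn, pvGo_eq (cs.length + 1) cs [] [] (by omega)]
  cases hsp : pvSp cs with
  | nil => exact absurd hsp (pvSp_ne_nil cs)
  | cons h t => simp

-- A's loop, written as structural recursion on the remaining characters
def pvF (k : Int) : List Char → List Char
  | [] => []
  | c :: cs => if c = '*' then pvToken k ++ pvF (k + 1) cs else c :: pvF k cs

theorem pvFoldl_eq (cs : List Char) (a : List Char) (k : Int) :
    (cs.foldl
      (fun (st : List Char × Int) ch =>
        if ch = '*' then (st.1 ++ pvToken st.2, st.2 + 1)
        else (st.1 ++ [ch], st.2)) (a, k)).1 = a ++ pvF k cs := by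
  induction cs generalizing a k with
  | nil => simp [pvF]
  | cons c cs ih =>
    by_cases hc : c = '*' <;> simp [pvF, hc, ih, List.append_assoc]

theorem pvF_eq_join (cs : List Char) (k : Int) :
    pvF k cs =
      (pvSp cs).headD [] ++
        (PySem.List.enumerate (pvSp cs).tail k).flatMap (fun ip => pvToken ip.1 ++ ip.2) := by
  induction cs generalizing k with
  | nil => simp [pvF, pvSp]
  | cons c cs ih =>
    obtain ⟨h, t, hht⟩ : ∃ h t, pvSp cs = h :: t := by
      cases hsp : pvSp cs with
      | nil => exact absurd hsp (pvSp_ne_nil cs)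
      | cons h t => exact ⟨h, t, rfl⟩
    by_cases hc : c = '*'
    · subst hc
      simp only [pvF, pvSp, ih, hht]
      simp [PySem.List.enumerate_cons, List.append_assoc]
    · simp [pvF, hc, pvSp, hht, ih k]

-- ===== VERDICT (by name: the statement is the Claim_ definition above) =====
theorem prep_smiles_libevent_spec : Claim_equal_prep_smiles_libevent := by
  intro smiles _
  unfold Spec_prep_smiles_libevent
  simp only [prep_smiles_libevent, prep_smiles_libevent_alt]
  rw [pvSplitOn_eq, pvFoldl_eq smiles.toList [] 0, pvF_eq_join]
  simp
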